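-- pv_equiv track=rewrite | github.com/PrinceSinghhub/GFG-Questions | Distinct Difference.py | getDistinctDifference
-- ===== SOURCE A (Python) =====
-- from typing import List
--
-- def getDistinctDifference(N: int, A: List[int]) -> List[int]:
--     # code here
--     arr = [0 for _ in range(N)]
--     s = set()
--     for i in range(N):
--         arr[i] = len(s)
--         s.add(A[i])
--     s.clear()
--     for i in range(N - 1, -1, -1):
--         arr[i] -= len(s)
--         s.add(A[i])
--     return arr
-- ===== SOURCE B (Python) =====
-- from typing import List
--
-- def getDistinctDifference(N: int, A: List[int]) -> List[int]:
--     # One forward pass: multiplicities of the whole prefix A[0:N] are counted once;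
--     # r tracks how many values still have a positive count (= distinct in the suffix).
--     cnt = {}
--     for i in range(N):
--         x = A[i]
--         cnt[x] = cnt.get(x, 0) + 1
--     r = len(cnt)
--     seen = set()
--     res = []
--     for i in range(N):
--         x = A[i]
--         cnt[x] -= 1
--         if cnt[x] == 0:
--             r -= 1
--         res.append(len(seen) - r)
--         seen.add(x)
--     return res
-- ===== Notes on version B (the rewrite author's own statement) =====
-- stated objective: alternative
-- what changed: A's two opposite-direction passes (each rebuilding a growing set, plus a zero-initialised array mutated twice) are fused into a single forward pass over a multiplicity dict built once: decrementing A[i] and tracking how many counts are still positive gives the suffix-distinct count directly, so the answer list is emitted left to right in one loop.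
import Mathlib
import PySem

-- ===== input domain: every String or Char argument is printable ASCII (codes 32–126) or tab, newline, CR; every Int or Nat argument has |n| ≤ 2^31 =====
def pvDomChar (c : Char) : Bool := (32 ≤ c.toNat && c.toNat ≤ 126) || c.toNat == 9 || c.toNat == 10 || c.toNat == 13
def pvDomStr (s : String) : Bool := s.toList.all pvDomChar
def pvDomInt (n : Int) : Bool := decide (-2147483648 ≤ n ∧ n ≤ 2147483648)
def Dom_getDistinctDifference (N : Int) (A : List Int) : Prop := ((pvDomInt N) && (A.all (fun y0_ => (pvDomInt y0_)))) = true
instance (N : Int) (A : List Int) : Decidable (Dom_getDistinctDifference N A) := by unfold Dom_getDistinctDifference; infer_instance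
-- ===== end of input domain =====

-- B fuses A's two opposite-direction set-building passes into one forward pass over a
-- multiplicity dict built once (alternative decomposition; same asymptotic cost).

-- ===== PORT A =====
def getDistinctDifference (N : Int) (A : List Int) : List Int :=
  -- arr = [0 for _ in range(N)]
  let arr0 := (PySem.List.pyRange 0 N 1).map (fun _ => (0 : Int))
  -- first loop: arr[i] = len(s); s.add(A[i])
  let st1 := (PySem.List.pyRange 0 N 1).foldl
      (fun (st : List Int × PySem.Set Int) i =>
        (PySem.List.pySetD st.1 i (PySem.Set.len st.2),
         PySem.Set.add st.2 (PySem.List.pyGetD A i 0)))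
      (arr0, (PySem.Set.empty : PySem.Set Int))
  -- s.clear(); second loop downwards: arr[i] -= len(s); s.add(A[i])
  let st2 := (PySem.List.pyRange (N - 1) (-1) (-1)).foldl
      (fun (st : List Int × PySem.Set Int) i =>
        (PySem.List.pySetD st.1 i (PySem.List.pyGetD st.1 i 0 - PySem.Set.len st.2),
         PySem.Set.add st.2 (PySem.List.pyGetD A i 0)))
      (st1.1, (PySem.Set.empty : PySem.Set Int))
  st2.1

-- ===== PORT B =====
def getDistinctDifference_alt (N : Int) (A : List Int) : List Int :=
  -- cnt[x] = cnt.get(x, 0) + 1 over A[0:N]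
  let cnt := (PySem.List.pyRange 0 N 1).foldl
      (fun (c : PySem.Dict Int Int) i =>
        c.insert (PySem.List.pyGetD A i 0) (c.getD (PySem.List.pyGetD A i 0) 0 + 1))
      PySem.Dict.empty
  -- r = len(cnt); single forward pass; cnt[x] -= 1 is exact as modify with default 0
  -- because x was counted in the first loop (inside Pre_).
  let st := (PySem.List.pyRange 0 N 1).foldl
      (fun (st : PySem.Dict Int Int × Int × PySem.Set Int × List Int) i =>
        let x := PySem.List.pyGetD A i 0
        let c := st.1.modify x 0 (· - 1)
        let r := if c.getD x 0 = 0 then st.2.1 - 1 else st.2.1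
        (c, r, PySem.Set.add st.2.2.1 x,
         st.2.2.2 ++ [PySem.Set.len st.2.2.1 - r]))
      (cnt, ((PySem.Dict.size cnt : Int)), (PySem.Set.empty : PySem.Set Int), ([] : List Int))
  st.2.2.2

-- ===== PRECONDITION & SPEC =====
-- Pre_ excludes exactly the inputs where Python A raises IndexError: N > len(A)
-- (A reads A[i] for i in range(N)). For every N ≤ len(A), including N ≤ 0, A returns.
def Pre_getDistinctDifference (N : Int) (A : List Int) : Prop := N ≤ (A.length : Int)
instance (N : Int) (A : List Int) : Decidable (Pre_getDistinctDifference N A) := by unfold Pre_getDistinctDifference; infer_instance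
def pvWitness_getDistinctDifference : Int × List Int := (3, [1, 2, 1])

def Spec_getDistinctDifference (N : Int) (A : List Int) (out : List Int) : Prop := out = getDistinctDifference_alt N A
instance (N : Int) (A : List Int) (out : List Int) : Decidable (Spec_getDistinctDifference N A out) := by unfold Spec_getDistinctDifference; infer_instance

-- ===== CLAIM (what is proved, stated in full; the proofs are below) =====
def Claim_equal_getDistinctDifference : Prop := ∀ (N : Int) (A : List Int), Dom_getDistinctDifference N A → Pre_getDistinctDifference N A → Spec_getDistinctDifference N A (getDistinctDifference N A)

-- ===== LEMMAS AND PROOFS =====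

def pvDC (l : List Int) : Int := (l.toFinset.card : Int)

theorem pv_len_ofList (l : List Int) : ((PySem.Set.ofList l).length : Int) = pvDC l := by
  have h1 : (PySem.Set.ofList l).toFinset = l.toFinset := by
    ext x; simp [List.mem_toFinset, PySem.Set.mem_ofList]
  have h2 := List.toFinset_card_of_nodup (PySem.Set.nodup_ofList l)
  unfold pvDC
  rw [← h2, h1]

theorem pv_getD_take (A : List Int) (n j : Nat) (h : j < n) :
    (A.take n).getD j 0 = A.getD j 0 := by
  simp [List.getD, h]

theorem pv_getD_map_range (f : Nat → Int) (n j : Nat) (h : j < n) :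
    (((List.range n).map f).getD j 0) = f j := by
  simp [List.getD, h]

theorem pv_loopA1 (A : List Int) (n : Nat) (hn : n ≤ A.length) :
    ∀ (k : Nat), k ≤ n →
    (PySem.List.pyRange 0 (k : Int) 1).foldl
      (fun (st : List Int × PySem.Set Int) i =>
        (PySem.List.pySetD st.1 i (PySem.Set.len st.2),
         PySem.Set.add st.2 (PySem.List.pyGetD A i 0)))
      (List.replicate n 0, (PySem.Set.empty : PySem.Set Int))
    = ((List.range k).map (fun j => ((PySem.Set.ofList (A.take j)).length : Int)) ++ List.replicate (n - k) (0:Int),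
       PySem.Set.ofList (A.take k)) := by
  intro k
  induction k with
  | zero =>
    intro _
    simp [PySem.List.pyRange_one_eq_nil (by omega : (0:Int) ≤ 0)]
  | succ k ih =>
    intro hk1
    have hk : k < n := by omega
    have hkA : k < A.length := by omega
    have hcast : ((k + 1 : Nat) : Int) = (k : Int) + 1 := by push_cast; ring
    rw [hcast, PySem.List.pyRange_one_succ_right (by positivity), List.foldl_append,
        ih (by omega)]
    simp only [List.foldl_cons, List.foldl_nil]
    have hx : PySem.List.pyGetD A (k : Int) 0 = A[k] := by
      rw [PySem.List.pyGetD_natCast, List.getD_eq_getElem A 0 hkA]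
    have hset : (((List.range k).map (fun j => ((PySem.Set.ofList (A.take j)).length : Int)) ++ List.replicate (n - k) (0:Int)).set k
          ((PySem.Set.ofList (A.take k)).length : Int))
        = (List.range (k+1)).map (fun j => ((PySem.Set.ofList (A.take j)).length : Int)) ++ List.replicate (n - (k+1)) (0:Int) := by
      have hlen : ((List.range k).map (fun j => ((PySem.Set.ofList (A.take j)).length : Int))).length = k := by simp
      have hrep : List.replicate (n - k) (0:Int) = 0 :: List.replicate (n - (k+1)) 0 := by
        have : n - k = (n - (k+1)) + 1 := by omega
        rw [this, List.replicate_succ]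
      rw [hrep, List.set_append_right _ _ (by omega), hlen]
      simp [List.range_succ, List.set_cons_zero, List.append_assoc]
    have htake : A.take (k+1) = A.take k ++ [A[k]] := by
      rw [List.take_add_one]
      simp [List.getElem?_eq_getElem hkA]
    simp only [Prod.mk.injEq]
    refine ⟨?_, ?_⟩
    · rw [PySem.List.pySetD_natCast]
      simpa [PySem.Set.len, PySem.List.len] using hset
    · rw [hx, htake, PySem.Set.ofList_append_singleton]

theorem pv_loopA2 (A : List Int) :
    ∀ (k : Nat), k ≤ A.length → ∀ (pre suf : List Int), pre.length = k → ∀ (s : PySem.Set Int),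
    (PySem.List.pyRange ((k : Int) - 1) (-1) (-1)).foldl
      (fun (st : List Int × PySem.Set Int) i =>
        (PySem.List.pySetD st.1 i (PySem.List.pyGetD st.1 i 0 - PySem.Set.len st.2),
         PySem.Set.add st.2 (PySem.List.pyGetD A i 0)))
      (pre ++ suf, s)
    = ((List.range k).map (fun j =>
         pre.getD j 0 - ((PySem.Set.update s (((A.take k).drop (j+1)).reverse)).length : Int)) ++ suf,
       PySem.Set.update s ((A.take k).reverse)) := by
  intro k
  induction k with
  | zero =>
    intro _ pre suf hpre s
    have hpre0 : pre = [] := List.eq_nil_of_length_eq_zero hpre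
    simp [hpre0, PySem.Set.update_nil]
  | succ k ih =>
    intro hk1 pre suf hpre s
    have hkA : k < A.length := by omega
    have hcast : ((k + 1 : Nat) : Int) - 1 = (k : Int) := by push_cast; ring
    rw [hcast, PySem.List.pyRange_neg_one_cons (by omega), List.foldl_cons]
    -- the single step at index k
    have hklt : k < pre.length := by omega
    have hget : PySem.List.pyGetD (pre ++ suf) (k : Int) 0 = pre.getD k 0 := by
      rw [PySem.List.pyGetD_natCast]
      simp [List.getD, List.getElem?_append_left hklt]
    set v : Int := pre.getD k 0 - PySem.Set.len s with hv
    have hset : PySem.List.pySetD (pre ++ suf) (k : Int) v = pre.take k ++ (v :: suf) := by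
      rw [PySem.List.pySetD_natCast, List.set_eq_take_append_cons_drop]
      have h1 : List.take k (pre ++ suf) = pre.take k := List.take_append_of_le_length (by omega)
      have h2 : List.drop (k+1) (pre ++ suf) = suf := by
        rw [← hpre, List.drop_left]
      rw [if_pos (by simp; omega), h1, h2]
    rw [hget, hset]
    have := ih (by omega) (pre.take k) (v :: suf) (by simp [List.length_take]; omega)
      (s.add (PySem.List.pyGetD A (k:Int) 0))
    rw [this]
    have hxA : PySem.List.pyGetD A (k : Int) 0 = A[k] := by
      rw [PySem.List.pyGetD_natCast, List.getD_eq_getElem A 0 hkA]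
    have htake : A.take (k+1) = A.take k ++ [A[k]] := by
      rw [List.take_add_one]
      simp [List.getElem?_eq_getElem hkA]
    have hrev : (A.take (k+1)).reverse = A[k] :: (A.take k).reverse := by
      rw [htake]; simp
    simp only [Prod.mk.injEq]
    refine ⟨?_, ?_⟩
    · -- lists
      rw [List.range_succ, List.map_append, List.map_singleton, List.append_assoc]
      have hlast : pre.getD k 0 -
          ((PySem.Set.update s (((A.take (k+1)).drop (k+1)).reverse)).length : Int) = v := by
        have : (A.take (k+1)).drop (k+1) = [] := by
          apply List.drop_eq_nil_of_le
          simp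
        rw [this]
        simp [PySem.Set.update_nil, hv, PySem.Set.len]
      rw [hlast]
      simp only [List.cons_append, List.nil_append]
      congr 1
      apply List.map_congr_left
      intro j hj
      have hjk : j < k := List.mem_range.mp hj
      have hgd : (pre.take k).getD j 0 = pre.getD j 0 := by
        simp [List.getD, hjk]
      rw [hgd]
      congr 2
      have hdrop : (A.take (k+1)).drop (j+1) = (A.take k).drop (j+1) ++ [A[k]] := by
        rw [htake, List.drop_append_of_le_length (by simp; omega)]
      rw [hxA, hdrop]
      simp [PySem.Set.update_cons]
    · rw [hxA, hrev, PySem.Set.update_cons]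

theorem pv_size_counter (T : List Int) : ((PySem.Dict.counter T).size : Int) = pvDC T := by
  have hk : (PySem.Dict.counter T).keys.length = (PySem.Dict.counter T).size := by
    simp [PySem.Dict.keys, PySem.Dict.size]
  rw [← hk, PySem.Dict.keys_counter, pv_len_ofList]

theorem pv_dc_cons (x : Int) (l : List Int) :
    pvDC (x :: l) = pvDC l + (if List.count x l = 0 then 1 else 0) := by
  unfold pvDC
  rw [List.toFinset_cons]
  by_cases hx : x ∈ l
  · rw [Finset.card_insert_of_mem (List.mem_toFinset.mpr hx),
      if_neg (by simpa [List.count_eq_zero] using hx)]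
    ring
  · rw [Finset.card_insert_of_notMem (by simpa [List.mem_toFinset] using hx),
      if_pos (List.count_eq_zero.mpr hx)]
    push_cast; ring

def pvInvB (T : List Int) (k : Nat) (st : PySem.Dict Int Int × Int × PySem.Set Int × List Int) : Prop :=
  (∀ v, st.1.getD v 0 = ((T.drop k).count v : Int)) ∧
  st.2.1 = pvDC (T.drop k) ∧
  st.2.2.1 = PySem.Set.ofList (T.take k) ∧
  st.2.2.2 = (List.range k).map (fun j => pvDC (T.take j) - pvDC (T.drop (j+1)))

theorem pv_loopB (T : List Int) :
    ∀ (k : Nat), k ≤ T.length →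
    pvInvB T k ((PySem.List.pyRange 0 (k : Int) 1).foldl
      (fun (st : PySem.Dict Int Int × Int × PySem.Set Int × List Int) i =>
        let x := PySem.List.pyGetD T i 0
        let c := st.1.modify x 0 (· - 1)
        let r := if c.getD x 0 = 0 then st.2.1 - 1 else st.2.1
        (c, r, PySem.Set.add st.2.2.1 x,
         st.2.2.2 ++ [PySem.Set.len st.2.2.1 - r]))
      (PySem.Dict.counter T, ((PySem.Dict.counter T).size : Int),
       (PySem.Set.empty : PySem.Set Int), ([] : List Int))) := by
  intro k
  induction k with
  | zero =>
    intro _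
    simp only [Nat.cast_zero]
    rw [PySem.List.pyRange_one_eq_nil (by omega : (0:Int) ≤ 0)]
    refine ⟨fun v => ?_, ?_, ?_, ?_⟩
    · simp [PySem.Dict.getD_counter]
    · simp [pv_size_counter]
    · rfl
    · rfl
  | succ k ih =>
    intro hk1
    have hk : k < T.length := by omega
    have hcast : ((k + 1 : Nat) : Int) = (k : Int) + 1 := by push_cast; ring
    rw [hcast, PySem.List.pyRange_one_succ_right (by positivity), List.foldl_append,
        List.foldl_cons, List.foldl_nil]
    obtain ⟨h1, h2, h3, h4⟩ := ih (by omega)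
    set st := ((PySem.List.pyRange 0 (k : Int) 1).foldl
      (fun (st : PySem.Dict Int Int × Int × PySem.Set Int × List Int) i =>
        let x := PySem.List.pyGetD T i 0
        let c := st.1.modify x 0 (· - 1)
        let r := if c.getD x 0 = 0 then st.2.1 - 1 else st.2.1
        (c, r, PySem.Set.add st.2.2.1 x,
         st.2.2.2 ++ [PySem.Set.len st.2.2.1 - r]))
      (PySem.Dict.counter T, ((PySem.Dict.counter T).size : Int),
       (PySem.Set.empty : PySem.Set Int), ([] : List Int))) with hst
    have hxT : PySem.List.pyGetD T (k : Int) 0 = T[k] := by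
      rw [PySem.List.pyGetD_natCast, List.getD_eq_getElem T 0 hk]
    have hdropk : T.drop k = T[k] :: T.drop (k+1) := List.drop_eq_getElem_cons hk
    have htakek : T.take (k+1) = T.take k ++ [T[k]] := by
      rw [List.take_add_one]; simp [List.getElem?_eq_getElem hk]
    -- new dict values
    have hcount : ∀ v, (T.drop k).count v = (T.drop (k+1)).count v + (if v = T[k] then 1 else 0) := by
      intro v
      by_cases h : v = T[k]
      · rw [h, if_pos rfl, List.drop_eq_getElem_cons hk, List.count_cons]
        simp
      · rw [if_neg h, List.drop_eq_getElem_cons hk, List.count_cons]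
        have hbe : (T[k] == v) = false := by
          simp only [beq_eq_false_iff_ne, ne_eq]
          exact fun hh => h hh.symm
        rw [hbe]
        simp
    have hc : ∀ v, (st.1.modify T[k] 0 (· - 1)).getD v 0 = ((T.drop (k+1)).count v : Int) := by
      intro v
      rw [PySem.Dict.getD_modify]
      by_cases hv : v = T[k]
      · rw [if_pos hv, h1, hv, hcount T[k], if_pos rfl]
        push_cast; ring
      · rw [if_neg hv, h1, hcount v, if_neg hv]
        push_cast; ring
    have hr : (if (st.1.modify T[k] 0 (· - 1)).getD T[k] 0 = 0 then st.2.1 - 1 else st.2.1)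
        = pvDC (T.drop (k+1)) := by
      rw [hc, h2, hdropk, pv_dc_cons]
      by_cases h0 : (T.drop (k+1)).count T[k] = 0
      · rw [if_pos (by exact_mod_cast h0), if_pos h0]; ring
      · rw [if_neg (by exact_mod_cast h0), if_neg h0]; ring
    refine ⟨?_, ?_, ?_, ?_⟩
    · simpa only [hxT] using hc
    · simpa only [hxT] using hr
    · show PySem.Set.add st.2.2.1 (PySem.List.pyGetD T (k:Int) 0) = _
      rw [hxT, h3, htakek, PySem.Set.ofList_append_singleton]
    · show st.2.2.2 ++ [PySem.Set.len st.2.2.1 - _] = _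
      rw [hxT, h4, h3, hr, List.range_succ, List.map_append, List.map_singleton]
      congr 2
      have : PySem.Set.len (PySem.Set.ofList (T.take k)) = pvDC (T.take k) := by
        simp [PySem.Set.len, pv_len_ofList]
      rw [this]

theorem pv_getD_AT (A : List Int) (n : Nat) (i : Int) (h0 : 0 ≤ i) (h1 : i < (n : Int)) :
    PySem.List.pyGetD A i 0 = PySem.List.pyGetD (A.take n) i 0 := by
  obtain ⟨j, rfl⟩ : ∃ j : Nat, i = (j : Int) := ⟨i.toNat, (Int.toNat_of_nonneg h0).symm⟩
  rw [PySem.List.pyGetD_natCast, PySem.List.pyGetD_natCast,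
    pv_getD_take A n j (by exact_mod_cast h1)]

-- ===== VERDICT (by name: the statement is the Claim_ definition above) =====
theorem getDistinctDifference_spec : Claim_equal_getDistinctDifference := by
  intro N A _hdom hpre
  unfold Spec_getDistinctDifference
  by_cases hN : N ≤ 0
  · simp [getDistinctDifference, getDistinctDifference_alt,
      PySem.List.pyRange_one_eq_nil hN,
      PySem.List.pyRange_neg_one_eq_nil (by omega : N - 1 ≤ -1)]
  · push Not at hN
    set n : Nat := N.toNat with hn
    have hNn : N = (n : Int) := (Int.toNat_of_nonneg (le_of_lt hN)).symm
    have hnA : n ≤ A.length := by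
      have : N ≤ (A.length : Int) := hpre
      omega
    set T : List Int := A.take n with hT
    have hTlen : T.length = n := by
      rw [hT, List.length_take]; omega
    -- ===== A side =====
    have hA : getDistinctDifference N A
        = (List.range n).map (fun j => pvDC (T.take j) - pvDC (T.drop (j+1))) := by
      simp only [getDistinctDifference]
      rw [hNn]
      have harr0 : (PySem.List.pyRange 0 (n:Int) 1).map (fun _ => (0:Int))
          = List.replicate n 0 := by
        rw [PySem.List.pyRange_one, List.map_map,
          show ((fun _ => (0:Int)) ∘ fun k : Nat => (0:Int) + (k:Int)) = (fun _ => (0:Int)) from rfl,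
          List.map_const']
        simp
      simp only [harr0]
      rw [pv_loopA1 A n hnA n le_rfl]
      simp only [Nat.sub_self, List.replicate_zero, List.append_nil]
      have hprelen : ((List.range n).map (fun j => ((PySem.Set.ofList (A.take j)).length : Int))).length = n := by simp
      rw [show ((n:Int)) = ((n:Int)) from rfl]
      conv_lhs =>
        rw [← List.append_nil ((List.range n).map (fun j => ((PySem.Set.ofList (A.take j)).length : Int)))]
      rw [pv_loopA2 A n hnA _ [] hprelen (PySem.Set.empty : PySem.Set Int)]
      rw [List.append_nil]
      apply List.map_congr_left
      intro j hj
      have hjn : j < n := List.mem_range.mp hj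
      rw [pv_getD_map_range _ n j hjn, pv_len_ofList, PySem.Set.update_empty, pv_len_ofList]
      have h1 : pvDC (A.take j) = pvDC (T.take j) := by
        rw [hT, List.take_take, min_eq_left (le_of_lt hjn)]
      have h2 : pvDC (((A.take n).drop (j+1)).reverse) = pvDC (T.drop (j+1)) := by
        unfold pvDC
        rw [List.toFinset_reverse, hT]
      rw [h1, h2]
    -- ===== B side =====
    have hB : getDistinctDifference_alt N A
        = (List.range n).map (fun j => pvDC (T.take j) - pvDC (T.drop (j+1))) := by
      simp only [getDistinctDifference_alt]
      rw [hNn]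
      have hcongr1 : (PySem.List.pyRange 0 (n:Int) 1).foldl
          (fun (c : PySem.Dict Int Int) i =>
            c.insert (PySem.List.pyGetD A i 0) (c.getD (PySem.List.pyGetD A i 0) 0 + 1))
          PySem.Dict.empty
        = (PySem.List.pyRange 0 (n:Int) 1).foldl
          (fun (c : PySem.Dict Int Int) i =>
            c.insert (PySem.List.pyGetD T i 0) (c.getD (PySem.List.pyGetD T i 0) 0 + 1))
          PySem.Dict.empty := by
        apply PySem.List.foldl_congr_mem
        intro acc x hx
        rw [PySem.List.mem_pyRange_one] at hx
        rw [← pv_getD_AT A n x hx.1 hx.2]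
      rw [hcongr1, ← hTlen]
      rw [PySem.List.foldl_pyRange_zero_pyGetD' T 0
        (fun (c : PySem.Dict Int Int) x => c.insert x (c.getD x 0 + 1)) PySem.Dict.empty]
      rw [PySem.Dict.foldl_insert_getD_add_one_eq_counter T]
      rw [hTlen]
      have hcongr2 : (PySem.List.pyRange 0 (n:Int) 1).foldl
          (fun (st : PySem.Dict Int Int × Int × PySem.Set Int × List Int) i =>
            let x := PySem.List.pyGetD A i 0
            let c := st.1.modify x 0 (· - 1)
            let r := if c.getD x 0 = 0 then st.2.1 - 1 else st.2.1
            (c, r, PySem.Set.add st.2.2.1 x,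
             st.2.2.2 ++ [PySem.Set.len st.2.2.1 - r]))
          (PySem.Dict.counter T, ((PySem.Dict.counter T).size : Int),
           (PySem.Set.empty : PySem.Set Int), ([] : List Int))
        = (PySem.List.pyRange 0 (n:Int) 1).foldl
          (fun (st : PySem.Dict Int Int × Int × PySem.Set Int × List Int) i =>
            let x := PySem.List.pyGetD T i 0
            let c := st.1.modify x 0 (· - 1)
            let r := if c.getD x 0 = 0 then st.2.1 - 1 else st.2.1
            (c, r, PySem.Set.add st.2.2.1 x,
             st.2.2.2 ++ [PySem.Set.len st.2.2.1 - r]))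
          (PySem.Dict.counter T, ((PySem.Dict.counter T).size : Int),
           (PySem.Set.empty : PySem.Set Int), ([] : List Int)) := by
        apply PySem.List.foldl_congr_mem
        intro acc x hx
        rw [PySem.List.mem_pyRange_one] at hx
        rw [← pv_getD_AT A n x hx.1 hx.2]
      rw [hcongr2]
      exact (pv_loopB T n (by omega)).2.2.2
    rw [hA, hB]
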